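-- pv_equiv track=rewrite | github.com/SontuCoder/Practices-Qusetion-DSA | ARRAY/Others/20.Maximum_Bitonic_length.py | inc_Bit
-- ===== SOURCE A (Python) =====
-- def inc_Bit(arr):
--     j=1
--     a=[]
--     a.append(1)
--     for i in range(1,len(arr)):
--         if(arr[i]>arr[i-1]):
--             j+=1
--             a.append(j)
--         else:
--             j=1
--             a.append(j)
--     return a
-- ===== SOURCE B (Python) =====
-- def inc_Bit(arr):
--     # Segment-based: locate each maximal strictly-increasing run, emit 1..run_length.
--     res = []
--     i, n = 0, len(arr)
--     while i < n:
--         k = i + 1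
--         while k < n and arr[k] > arr[k - 1]:
--             k += 1
--         res.extend(range(1, k - i + 1))
--         i = k
--     return res
-- ===== Notes on version B (the rewrite author's own statement) =====
-- stated objective: alternative
-- what changed: Replaces the per-index running counter with a two-level segment scan: find each maximal strictly-increasing run and emit the block 1..run_length at once; on the empty list B naturally returns an empty list instead of A's spurious one-element result.
-- intended difference: On the empty list A returns a one-element list holding the value 1 (it appends unconditionally before its loop) while B returns an empty list; an empty array has no elements and hence no run lengths, so the empty list is the intended value. — e.g. on inc_Bit([]): A returns [1], B returns []
import Mathlib
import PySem

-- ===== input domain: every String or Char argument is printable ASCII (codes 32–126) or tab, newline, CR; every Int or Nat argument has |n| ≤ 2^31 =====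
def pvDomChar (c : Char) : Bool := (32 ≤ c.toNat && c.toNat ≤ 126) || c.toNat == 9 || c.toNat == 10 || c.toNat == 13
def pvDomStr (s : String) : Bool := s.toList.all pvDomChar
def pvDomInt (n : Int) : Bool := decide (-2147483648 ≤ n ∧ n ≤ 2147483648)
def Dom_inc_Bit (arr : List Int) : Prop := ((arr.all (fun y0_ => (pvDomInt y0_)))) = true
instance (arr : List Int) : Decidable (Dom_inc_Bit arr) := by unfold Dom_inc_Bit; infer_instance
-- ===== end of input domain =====

-- B replaces A's per-index running counter with a segment scan (find each maximal
-- increasing run, emit 1..run_length); on the empty list B naturally returns an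
-- empty list where A returns a one-element list holding the value 1.

-- ===== PORT A =====
-- Source A: j=1; a=[1]; for i in range(1,len(arr)): if arr[i]>arr[i-1]: j+=1; a.append(j) else: j=1; a.append(1)
def inc_Bit (arr : List Int) : List Int :=
  ((PySem.List.pyRange 1 (arr.length : Int) 1).foldl
    (fun (st : Int × List Int) i =>
      if PySem.List.pyGetD arr i 0 > PySem.List.pyGetD arr (i - 1) 0 then
        (st.1 + 1, st.2 ++ [st.1 + 1])
      else
        (1, st.2 ++ [1]))
    (1, [1])).2

-- ===== PORT B =====
-- Source B inner while: k = i+1; while k < n and arr[k] > arr[k-1]: k += 1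
-- (fuel = a structural bound on the remaining iterations; it only makes the loop total)
def pvRunEnd (arr : List Int) (n : Int) : Nat → Int → Int
  | 0, k => k
  | fuel + 1, k =>
    if k < n ∧ PySem.List.pyGetD arr k 0 > PySem.List.pyGetD arr (k - 1) 0 then
      pvRunEnd arr n fuel (k + 1)
    else k

-- Source B outer while: while i < n: k = <inner>; res.extend(range(1, k-i+1)); i = k
def pvOuter (arr : List Int) (n : Int) : Nat → Int → List Int → List Int
  | 0, _, res => res
  | fuel + 1, i, res =>
    if i < n then
      let k := pvRunEnd arr n (n - (i + 1)).toNat (i + 1)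
      pvOuter arr n fuel k (res ++ PySem.List.pyRange 1 (k - i + 1) 1)
    else res

def inc_Bit_alt (arr : List Int) : List Int :=
  pvOuter arr (arr.length : Int) arr.length 0 []

-- ===== PRECONDITION & SPEC =====
-- On the empty list A returns a one-element list holding the value 1 (it appends
-- unconditionally before its loop) while B returns an empty list; an empty array has
-- no elements and hence no run lengths, so the empty list is the intended value.
def D_inc_Bit (arr : List Int) : Prop := arr = []
instance (arr : List Int) : Decidable (D_inc_Bit arr) := by unfold D_inc_Bit; infer_instance

def Spec_inc_Bit (arr : List Int) (out : List Int) : Prop := ¬ D_inc_Bit arr → out = inc_Bit_alt arr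
instance (arr : List Int) (out : List Int) : Decidable (Spec_inc_Bit arr out) := by unfold Spec_inc_Bit; infer_instance

def pvDiffWitness_inc_Bit : List Int := []
def pvDiffWitnessOut_inc_Bit : (List Int) × (List Int) := ([1], [])

-- ===== CLAIM (what is proved, stated in full; the proofs are below) =====
def Claim_unchanged_inc_Bit : Prop := ∀ (arr : List Int), Dom_inc_Bit arr → Spec_inc_Bit arr (inc_Bit arr)
def Claim_changed_inc_Bit : Prop := Dom_inc_Bit (pvDiffWitness_inc_Bit) ∧ D_inc_Bit (pvDiffWitness_inc_Bit) ∧ inc_Bit (pvDiffWitness_inc_Bit) = pvDiffWitnessOut_inc_Bit.1 ∧ inc_Bit_alt (pvDiffWitness_inc_Bit) = pvDiffWitnessOut_inc_Bit.2 ∧ pvDiffWitnessOut_inc_Bit.1 ≠ pvDiffWitnessOut_inc_Bit.2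
def Claim_exact_inc_Bit : Prop := ∀ (arr : List Int), Dom_inc_Bit arr → D_inc_Bit arr → inc_Bit arr ≠ inc_Bit_alt arr


-- ===== LEMMAS AND PROOFS =====
-- Reference scan: pvCounts prev j rest = the counts A's loop emits from state (prev, j).
def pvCounts (prev j : Int) : List Int → List Int
  | [] => []
  | y :: ys => if y > prev then (j + 1) :: pvCounts y (j + 1) ys else 1 :: pvCounts y 1 ys

-- Length of the strictly increasing run continuing after prev.
def pvRunLen (prev : Int) : List Int → Nat
  | [] => 0
  | y :: ys => if y > prev then 1 + pvRunLen y ys else 0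

-- Structural form of B's segment loop.
def pvSeg : List Int → List Int
  | [] => []
  | x :: xs =>
    PySem.List.pyRange 1 (((1 + pvRunLen x xs : Nat) : Int) + 1) 1
      ++ pvSeg (xs.drop (pvRunLen x xs))
termination_by l => l.length
decreasing_by simp

theorem pvSeg_nil : pvSeg [] = [] := by
  rw [pvSeg.eq_def]

theorem pvSeg_cons (x : Int) (xs : List Int) :
    pvSeg (x :: xs)
      = PySem.List.pyRange 1 (((1 + pvRunLen x xs : Nat) : Int) + 1) 1
          ++ pvSeg (xs.drop (pvRunLen x xs)) := by
  conv_lhs => rw [pvSeg.eq_def]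

theorem pvRunLen_le (prev : Int) (l : List Int) : pvRunLen prev l ≤ l.length := by
  induction l generalizing prev with
  | nil => simp [pvRunLen]
  | cons y ys ih =>
    simp only [pvRunLen]
    split
    · have := ih y; simp; omega
    · simp

theorem pvRunEnd_eq (arr : List Int) (fuel : Nat) : ∀ (k : Nat), 1 ≤ k → k ≤ arr.length →
    arr.length - k ≤ fuel →
    pvRunEnd arr (arr.length : Int) fuel (k : Int)
      = (k : Int) + pvRunLen (arr.getD (k - 1) 0) (arr.drop k) := by
  induction fuel with
  | zero =>
    intro k hk hle hf
    have hkl : k = arr.length := by omega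
    rw [pvRunEnd]
    rw [hkl, List.drop_eq_nil_of_le le_rfl]
    simp [pvRunLen]
  | succ fuel ih =>
    intro k hk hle hf
    rw [pvRunEnd]
    have hc : ((k : Int) - 1) = ((k - 1 : Nat) : Int) := by omega
    by_cases h : k < arr.length
    · have hdrop : arr.drop k = arr[k] :: arr.drop (k + 1) := List.drop_eq_getElem_cons h
      by_cases hgt : arr[k] > arr.getD (k - 1) 0
      · rw [if_pos ⟨by exact_mod_cast h, by
          rw [PySem.List.pyGetD_natCast, hc, PySem.List.pyGetD_natCast,
            arr.getD_eq_getElem 0 h]; exact hgt⟩]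
        rw [show ((k : Int) + 1) = ((k + 1 : Nat) : Int) by omega,
          ih (k + 1) (by omega) (by omega) (by omega)]
        rw [hdrop]
        simp only [pvRunLen, if_pos hgt]
        have hg : arr.getD (k + 1 - 1) 0 = arr[k] := by
          rw [show k + 1 - 1 = k from rfl, arr.getD_eq_getElem 0 h]
        rw [hg]
        omega
      · rw [if_neg (by
          rintro ⟨-, hgt'⟩
          rw [PySem.List.pyGetD_natCast, hc, PySem.List.pyGetD_natCast,
            arr.getD_eq_getElem 0 h] at hgt'
          exact hgt hgt')]
        rw [hdrop]
        simp only [pvRunLen, if_neg hgt]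
        omega
    · rw [if_neg (by rintro ⟨hlt, -⟩; exact h (by exact_mod_cast hlt))]
      rw [List.drop_eq_nil_of_le (by omega)]
      simp [pvRunLen]

theorem pvOuter_succ (arr : List Int) (n : Int) (fuel : Nat) (i : Int) (res : List Int)
    (h : i < n) :
    pvOuter arr n (fuel + 1) i res
      = pvOuter arr n fuel (pvRunEnd arr n (n - (i + 1)).toNat (i + 1))
          (res ++ PySem.List.pyRange 1 ((pvRunEnd arr n (n - (i + 1)).toNat (i + 1)) - i + 1) 1) := by
  rw [pvOuter, if_pos h]

theorem pvOuter_eq (arr : List Int) (fuel : Nat) : ∀ (i : Nat) (res : List Int),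
    i ≤ arr.length → arr.length - i ≤ fuel →
    pvOuter arr (arr.length : Int) fuel (i : Int) res = res ++ pvSeg (arr.drop i) := by
  induction fuel with
  | zero =>
    intro i res hle hf
    rw [pvOuter]
    rw [List.drop_eq_nil_of_le (by omega), pvSeg_nil, List.append_nil]
  | succ fuel ih =>
    intro i res hle hf
    by_cases h : i < arr.length
    · rw [pvOuter_succ arr _ fuel _ res (by exact_mod_cast h)]
      rw [show ((i : Int) + 1) = ((i + 1 : Nat) : Int) by omega]
      rw [show ((arr.length : Int) - ((i + 1 : Nat) : Int)).toNat = arr.length - (i + 1) by omega]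
      rw [pvRunEnd_eq arr (arr.length - (i + 1)) (i + 1) (by omega) (by omega) le_rfl]
      have hgd : arr.getD (i + 1 - 1) 0 = arr[i] := by
        rw [show i + 1 - 1 = i from rfl, arr.getD_eq_getElem 0 h]
      rw [hgd]
      set r := pvRunLen arr[i] (arr.drop (i + 1)) with hr
      have hrle : r ≤ (arr.drop (i + 1)).length := pvRunLen_le _ _
      have hlen : (arr.drop (i + 1)).length = arr.length - (i + 1) := by simp
      rw [show ((i + 1 : Nat) : Int) + (r : Int) = ((i + 1 + r : Nat) : Int) by push_cast; ring]
      rw [ih (i + 1 + r) _ (by omega) (by omega)]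
      have hdrop : arr.drop i = arr[i] :: arr.drop (i + 1) := List.drop_eq_getElem_cons h
      rw [hdrop, pvSeg_cons, ← hr]
      rw [List.drop_drop]
      rw [show ((i + 1 + r : Nat) : Int) - (i : Int) + 1 = ((1 + r : Nat) : Int) + 1 by push_cast; ring]
      rw [List.append_assoc]
    · rw [pvOuter, if_neg (by intro hlt; exact h (by exact_mod_cast hlt))]
      have hi : i = arr.length := by omega
      rw [hi, List.drop_eq_nil_of_le le_rfl, pvSeg_nil, List.append_nil]

theorem inc_Bit_alt_eq (arr : List Int) : inc_Bit_alt arr = pvSeg arr := by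
  unfold inc_Bit_alt
  have h := pvOuter_eq arr arr.length 0 [] (by omega) (by omega)
  simpa using h

theorem pvRangeMapShift (r : Nat) (c : Int) :
    (List.range (r + 1)).map (fun t : Nat => c + (t : Int))
      = c :: (List.range r).map (fun t : Nat => c + 1 + (t : Int)) := by
  rw [List.range_succ_eq_map, List.map_cons, List.map_map]
  congr 1
  · simp
  · apply List.map_congr_left
    intro t _
    simp only [Function.comp_apply, Nat.succ_eq_add_one]
    push_cast; ring

theorem pvCounts_run (xs : List Int) : ∀ (x j : Int),
    pvCounts x j xs
      = (List.range (pvRunLen x xs)).map (fun t : Nat => j + 1 + (t : Int))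
        ++ (match xs.drop (pvRunLen x xs) with
            | [] => []
            | y :: ys => 1 :: pvCounts y 1 ys) := by
  induction xs with
  | nil => intro x j; simp [pvCounts, pvRunLen]
  | cons y ys ih =>
    intro x j
    by_cases hgt : y > x
    · simp only [pvCounts, pvRunLen, if_pos hgt]
      rw [ih y (j + 1)]
      rw [show 1 + pvRunLen y ys = pvRunLen y ys + 1 from Nat.add_comm _ _]
      rw [List.drop_succ_cons, pvRangeMapShift (pvRunLen y ys) (j + 1), List.cons_append]
    · simp [pvCounts, pvRunLen, hgt]

theorem pvSeg_eq (l : List Int) :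
    pvSeg l = (match l with | [] => [] | x :: xs => 1 :: pvCounts x 1 xs) := by
  match l with
  | [] => exact pvSeg_nil
  | x :: xs =>
    show pvSeg (x :: xs) = 1 :: pvCounts x 1 xs
    rw [pvSeg_cons]
    rw [pvSeg_eq (xs.drop (pvRunLen x xs))]
    rw [pvCounts_run xs x 1]
    rw [PySem.List.pyRange_one]
    rw [show ((((1 + pvRunLen x xs : Nat) : Int) + 1) - 1).toNat = pvRunLen x xs + 1 by omega]
    rw [pvRangeMapShift (pvRunLen x xs) 1, List.cons_append]
termination_by l.length
decreasing_by simp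

theorem inc_Bit_fold (arr : List Int) (xs : List Int) : ∀ (i : Nat) (j : Int) (a : List Int),
    arr.drop i = xs → 1 ≤ i →
    ((PySem.List.pyRange (i : Int) (arr.length : Int) 1).foldl
      (fun (st : Int × List Int) idx =>
        if PySem.List.pyGetD arr idx 0 > PySem.List.pyGetD arr (idx - 1) 0 then
          (st.1 + 1, st.2 ++ [st.1 + 1])
        else
          (1, st.2 ++ [1])) (j, a)).2
      = a ++ pvCounts (arr.getD (i - 1) 0) j xs := by
  induction xs with
  | nil =>
    intro i j a hd hi
    have hlen : arr.length ≤ i := by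
      have := congrArg List.length hd; simp at this; omega
    rw [PySem.List.pyRange_one_eq_nil (by exact_mod_cast hlen)]
    simp [pvCounts]
  | cons x xs' ih =>
    intro i j a hd hi
    have hi' : i < arr.length := by
      by_contra hcon
      rw [List.drop_eq_nil_of_le (by omega)] at hd
      exact List.cons_ne_nil x xs' hd.symm
    have hdrop := List.drop_eq_getElem_cons hi'
    rw [hd] at hdrop
    have hx : arr[i] = x := (List.cons.injEq _ _ _ _ ▸ hdrop).1.symm
    have hxs : arr.drop (i + 1) = xs' := ((List.cons.injEq _ _ _ _ ▸ hdrop).2).symm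
    rw [PySem.List.pyRange_one_cons (by exact_mod_cast hi'), List.foldl_cons]
    have hcond : (PySem.List.pyGetD arr (i : Int) 0 > PySem.List.pyGetD arr ((i : Int) - 1) 0)
        = (x > arr.getD (i - 1) 0) := by
      rw [PySem.List.pyGetD_natCast, show ((i : Int) - 1) = ((i - 1 : Nat) : Int) by omega,
        PySem.List.pyGetD_natCast, arr.getD_eq_getElem 0 hi', hx]
    have hgd1 : arr.getD (i + 1 - 1) 0 = x := by
      rw [show i + 1 - 1 = i from rfl, arr.getD_eq_getElem 0 hi', hx]
    by_cases hgt : x > arr.getD (i - 1) 0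
    · rw [if_pos (by rw [hcond]; exact hgt)]
      rw [show ((i : Int) + 1) = ((i + 1 : Nat) : Int) by omega]
      rw [ih (i + 1) (j + 1) (a ++ [j + 1]) hxs (by omega)]
      rw [hgd1]
      simp only [pvCounts, if_pos hgt, List.append_assoc, List.cons_append, List.nil_append]
    · rw [if_neg (by rw [hcond]; exact hgt)]
      rw [show ((i : Int) + 1) = ((i + 1 : Nat) : Int) by omega]
      rw [ih (i + 1) 1 (a ++ [1]) hxs (by omega)]
      rw [hgd1]
      simp only [pvCounts, if_neg hgt, List.append_assoc, List.cons_append, List.nil_append]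

theorem inc_Bit_cons (x : Int) (xs : List Int) :
    inc_Bit (x :: xs) = 1 :: pvCounts x 1 xs := by
  have h := inc_Bit_fold (x :: xs) xs 1 1 [1] (by simp) le_rfl
  unfold inc_Bit
  simpa using h

-- ===== VERDICT (by name: the statement is the Claim_ definition above) =====
theorem inc_Bit_spec : Claim_unchanged_inc_Bit := by
  intro arr _ hND
  match arr with
  | [] => simp [D_inc_Bit] at hND
  | x :: xs =>
    rw [inc_Bit_cons, inc_Bit_alt_eq, pvSeg_eq]

theorem inc_Bit_changed : Claim_changed_inc_Bit := by
  unfold Claim_changed_inc_Bit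
  decide

theorem inc_Bit_tight : Claim_exact_inc_Bit := by
  unfold Claim_exact_inc_Bit
  intro arr _ hD
  subst hD
  decide
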